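-- pv_equiv track=rewrite | github.com/xdudaj02/Bioinformatics | lab_2/sequence_functions.py | all_proteins_rf
-- ===== SOURCE A (Python) =====
-- def all_proteins_rf (aa_seq):
--     """Computes all posible proteins in an aminoacid sequence."""
--     aa_seq = aa_seq.upper()
--     current_prot = []
--     proteins = []
--     for aa in aa_seq:
--         if aa == "_":
--             if current_prot:
--                 for p in current_prot:
--                     proteins.append(p)
--                 current_prot = []
--         else:
--             if aa == "M":
--                 current_prot.append("")
--             for i in range(len(current_prot)):
--                 current_prot[i] += aa
--     return proteins
-- ===== SOURCE B (Python) =====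
-- def all_proteins_rf(aa_seq):
--     """Computes all posible proteins in an aminoacid sequence."""
--     s = aa_seq.upper()
--     proteins = []
--     starts = []
--     for i, c in enumerate(s):
--         if c == 'M':
--             starts.append(i)
--         elif c == '_':
--             proteins.extend(s[m:i] for m in starts)
--             starts = []
--     return proteins
-- ===== Notes on version B (the rewrite author's own statement) =====
-- stated objective: faster
-- what changed: Instead of growing every open protein string character by character, B records the index of each start residue and emits slices of the sequence up to each stop marker in one pass.
import Mathlib
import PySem

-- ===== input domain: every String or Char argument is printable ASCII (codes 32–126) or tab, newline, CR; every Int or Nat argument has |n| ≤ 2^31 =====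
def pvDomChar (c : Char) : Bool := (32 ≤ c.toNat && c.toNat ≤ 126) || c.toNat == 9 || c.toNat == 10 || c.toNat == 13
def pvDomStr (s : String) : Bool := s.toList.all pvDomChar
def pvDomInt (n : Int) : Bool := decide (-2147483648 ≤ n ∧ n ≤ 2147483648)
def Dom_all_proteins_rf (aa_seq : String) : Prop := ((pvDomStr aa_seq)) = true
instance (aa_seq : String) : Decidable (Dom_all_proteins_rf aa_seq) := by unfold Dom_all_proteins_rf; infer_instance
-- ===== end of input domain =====

-- B replaces A's char-by-char growth of every open protein with recorded
-- start indices and one slice per protein emitted at each stop marker (objective: faster).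


-- ===== PORT A =====
-- literal port of A: fold over the uppercased characters, state = (current_prot, proteins);
-- the inner `for i in range(len(current_prot)): current_prot[i] += aa` is the map (·.push aa)
def all_proteins_rf (aa_seq : String) : List String :=
  let s := PySem.Str.upper aa_seq
  let st := s.toList.foldl
    (fun (st : List String × List String) aa =>
      if aa = '_' then
        if st.1 ≠ [] then ([], st.2 ++ st.1) else st
      else
        let cp := if aa = 'M' then st.1 ++ [""] else st.1
        (cp.map (fun p => p.push aa), st.2))
    ([], [])
  st.2

-- ===== PORT B =====
-- literal port of Source B: enumerate the uppercased string, record 'M' indices, emit slices on '_'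
def all_proteins_rf_alt (aa_seq : String) : List String :=
  let s := PySem.Str.upper aa_seq
  let st := (PySem.List.enumerate s.toList 0).foldl
    (fun (st : List Int × List String) ic =>
      if ic.2 = 'M' then (st.1 ++ [ic.1], st.2)
      else if ic.2 = '_' then
        ([], st.2 ++ st.1.map (fun m => PySem.Str.slice s (some m) (some ic.1)))
      else st)
    ([], [])
  st.2

-- ===== PRECONDITION & SPEC =====
def Spec_all_proteins_rf (aa_seq : String) (out : List String) : Prop := out = all_proteins_rf_alt aa_seq
instance (aa_seq : String) (out : List String) : Decidable (Spec_all_proteins_rf aa_seq out) := by unfold Spec_all_proteins_rf; infer_instance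

-- ===== CLAIM (what is proved, stated in full; the proofs are below) =====
def Claim_equal_all_proteins_rf : Prop := ∀ (aa_seq : String), Dom_all_proteins_rf aa_seq → Spec_all_proteins_rf aa_seq (all_proteins_rf aa_seq)

-- ===== LEMMAS AND PROOFS =====

-- the slice a Nat start index denotes at position k, as a String
def pvSliceAt (cs : List Char) (m k : Nat) : String := String.ofList ((cs.drop m).take (k - m))

theorem pvStrSlice_eq (s : String) (m k : Nat) :
    PySem.Str.slice s (some (m : Int)) (some (k : Int)) = pvSliceAt s.toList m k := by
  apply String.toList_inj.mp
  rw [PySem.Str.toList_slice, PySem.Chars.slice_eq_listSlice, PySem.List.slice_natCast]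
  simp [pvSliceAt]

theorem pvSliceAt_push (cs : List Char) (m k : Nat) (hm : m ≤ k) (hk : k < cs.length) :
    (pvSliceAt cs m k).push cs[k] = pvSliceAt cs m (k + 1) := by
  apply String.toList_inj.mp
  simp only [pvSliceAt, String.toList_push, String.toList_ofList]
  have h1 : (cs.drop m)[k - m]? = some cs[k] := by
    rw [List.getElem?_drop]
    have h2 : m + (k - m) = k := by omega
    rw [h2, List.getElem?_eq_getElem hk]
  have h3 : k + 1 - m = (k - m) + 1 := by omega
  rw [h3, List.take_add_one, h1]
  rfl

theorem pv_main (s : String) (rest : List Char) (k : Nat)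
    (hrest : rest = s.toList.drop k)
    (starts : List Nat) (pr : List String) (hstarts : ∀ m ∈ starts, m ≤ k) :
    (rest.foldl
      (fun (st : List String × List String) aa =>
        if aa = '_' then
          if st.1 ≠ [] then ([], st.2 ++ st.1) else st
        else
          let cp := if aa = 'M' then st.1 ++ [""] else st.1
          (cp.map (fun p => p.push aa), st.2))
      (starts.map (fun m => pvSliceAt s.toList m k), pr)).2
    = ((PySem.List.enumerate rest (k : Int)).foldl
      (fun (st : List Int × List String) ic =>
        if ic.2 = 'M' then (st.1 ++ [ic.1], st.2)
        else if ic.2 = '_' then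
          ([], st.2 ++ st.1.map (fun m => PySem.Str.slice s (some m) (some ic.1)))
        else st)
      (starts.map (fun (m : Nat) => ((m : Nat) : Int)), pr)).2 := by
  induction rest generalizing k starts pr with
  | nil => simp [PySem.List.enumerate_nil]
  | cons c rest ih =>
    have hk : k < s.toList.length := by
      by_contra h
      rw [List.drop_eq_nil_of_le (by omega)] at hrest
      exact List.cons_ne_nil _ _ hrest
    have hc : c = s.toList[k] := by
      have := congrArg (·[0]?) hrest
      simpa [List.getElem?_drop, List.getElem?_eq_getElem hk] using this
    have hrest' : rest = s.toList.drop (k + 1) := by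
      have := congrArg List.tail hrest
      simpa [List.tail_drop] using this
    rw [PySem.List.enumerate_cons]
    simp only [List.foldl_cons]
    by_cases h_ : c = '_'
    · have hM : ¬ c = 'M' := by rw [h_]; decide
      have hB : (starts.map (fun (m : Nat) => ((m : Nat) : Int))).map
            (fun m => PySem.Str.slice s (some m) (some ((k : Int))))
          = starts.map (fun m => pvSliceAt s.toList m k) := by
        rw [List.map_map]
        exact List.map_congr_left (fun m _ => pvStrSlice_eq s m k)
      have hAstep : (if c = '_' then
            (if (starts.map (fun m => pvSliceAt s.toList m k)) ≠ [] then
              (([] : List String), pr ++ starts.map (fun m => pvSliceAt s.toList m k))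
            else (starts.map (fun m => pvSliceAt s.toList m k), pr))
          else
            ((if c = 'M' then (starts.map (fun m => pvSliceAt s.toList m k)) ++ [""]
              else starts.map (fun m => pvSliceAt s.toList m k)).map (fun p => p.push c), pr))
          = (([] : List String), pr ++ starts.map (fun m => pvSliceAt s.toList m k)) := by
        rw [if_pos h_]
        by_cases hnil : (starts.map (fun m => pvSliceAt s.toList m k)) = []
        · simp [hnil]
        · simp [hnil]
      have hrec := ih (k + 1) hrest' [] (pr ++ starts.map (fun m => pvSliceAt s.toList m k)) (by simp)
      simp only [h_, if_pos] at hAstep ⊢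
      rw [hAstep]
      simp only [hB]
      simpa using hrec
    · set starts' : List Nat := if c = 'M' then starts ++ [k] else starts with hs'
      have hstarts' : ∀ m ∈ starts', m ≤ k + 1 := by
        intro m hm
        by_cases hM : c = 'M' <;> simp [hs', hM] at hm
        · rcases hm with hm | hm
          · have := hstarts m hm; omega
          · omega
        · have := hstarts m hm; omega
      have hle : ∀ m ∈ starts', m ≤ k := by
        intro m hm
        by_cases hM : c = 'M' <;> simp [hs', hM] at hm
        · rcases hm with hm | hm
          · exact hstarts m hm
          · omega
        · exact hstarts m hm
      have hcp : ((if c = 'M' then (starts.map (fun m => pvSliceAt s.toList m k)) ++ [""]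
              else starts.map (fun m => pvSliceAt s.toList m k)).map (fun p => p.push c))
          = starts'.map (fun m => pvSliceAt s.toList m (k + 1)) := by
        have hmid : (if c = 'M' then (starts.map (fun m => pvSliceAt s.toList m k)) ++ [""]
              else starts.map (fun m => pvSliceAt s.toList m k))
            = starts'.map (fun m => pvSliceAt s.toList m k) := by
          by_cases hM : c = 'M' <;> simp [hs', hM, pvSliceAt]
        rw [hmid, List.map_map]
        apply List.map_congr_left
        intro m hm
        have := pvSliceAt_push s.toList m k (hle m hm) hk
        simpa [hc] using this
      have hBstarts : (if c = 'M' then (starts.map (fun (m : Nat) => ((m : Nat) : Int))) ++ [((k : Nat) : Int)]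
            else starts.map (fun (m : Nat) => ((m : Nat) : Int)))
          = starts'.map (fun (m : Nat) => ((m : Nat) : Int)) := by
        by_cases hM : c = 'M' <;> simp [hs', hM]
      by_cases hM : c = 'M'
      · simp only [hM, ite_true] at hcp hBstarts ⊢
        rw [hcp, hBstarts]
        exact ih (k + 1) hrest' starts' pr hstarts'
      · simp only [if_neg h_, hM, ite_false] at hcp hBstarts ⊢
        rw [hcp, hBstarts]
        exact ih (k + 1) hrest' starts' pr hstarts'

-- ===== VERDICT (by name: the statement is the Claim_ definition above) =====
theorem all_proteins_rf_spec : Claim_equal_all_proteins_rf := by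
  intro aa_seq _
  unfold Spec_all_proteins_rf all_proteins_rf all_proteins_rf_alt
  have := pv_main (PySem.Str.upper aa_seq) (PySem.Str.upper aa_seq).toList 0 (by simp) [] [] (by simp)
  simpa using this
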